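-- pv_equiv track=rewrite | github.com/shellydeforte/deconstruct_lc | deconstruct_lc/tools_lc.py | seq_to_kmers_nomiss
-- ===== SOURCE A (Python) =====
-- def seq_to_kmers(sequence, k):
--     """Given a sequence, return a list of all overlapping k-mers"""
--     i = 0
--     len_sequence = len(sequence)
--     kmers = []
--     while i+k <= len_sequence:
--         kmers.append(sequence[i:i+k])
--         i += 1
--     return kmers
--
-- def seq_to_kmers_nomiss(seq, miss_seq, k):
--     """Only return kmers without a missing residue"""
--     seq_kmers = seq_to_kmers(seq, k)
--     miss_kmers = seq_to_kmers(miss_seq, k)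
--     new_kmers = []
--     for seq_kmer, miss_kmer in zip(seq_kmers, miss_kmers):
--         if miss_kmer.count('X') == 0:
--             new_kmers.append(seq_kmer)
--     return new_kmers
-- ===== SOURCE B (Python) =====
-- def seq_to_kmers_nomiss(seq, miss_seq, k):
--     """Only return kmers whose missing-residue window contains no 'X'.
--
--     Tests each window in O(1) via prefix counts of 'X' instead of
--     re-counting every k-wide slice of miss_seq.
--     """
--     if k < 0:
--         return []
--     n = min(len(seq), len(miss_seq))
--     pref = [0]
--     for ch in miss_seq[:n]:
--         pref.append(pref[-1] + (1 if ch == 'X' else 0))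
--     return [seq[i:i + k] for i in range(n - k + 1) if pref[i + k] == pref[i]]
-- ===== Notes on version B (the rewrite author's own statement) =====
-- stated objective: faster
-- what changed: B precomputes one prefix-sum array of 'X' counts over miss_seq and tests each window in O(1), instead of A's building both k-mer lists and re-counting 'X' in every k-wide slice of miss_seq.
-- intended difference: For k < 0 A returns a non-empty list of accidental slice fragments (empty strings and negative-stop slices of seq), an artefact of Python slice arithmetic; B returns [], the intended value since no k-mer of negative length exists. — e.g. on seq_to_kmers_nomiss("AB", "AB", -1): A returns ["A", "", "", ""], B returns []
import Mathlib
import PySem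

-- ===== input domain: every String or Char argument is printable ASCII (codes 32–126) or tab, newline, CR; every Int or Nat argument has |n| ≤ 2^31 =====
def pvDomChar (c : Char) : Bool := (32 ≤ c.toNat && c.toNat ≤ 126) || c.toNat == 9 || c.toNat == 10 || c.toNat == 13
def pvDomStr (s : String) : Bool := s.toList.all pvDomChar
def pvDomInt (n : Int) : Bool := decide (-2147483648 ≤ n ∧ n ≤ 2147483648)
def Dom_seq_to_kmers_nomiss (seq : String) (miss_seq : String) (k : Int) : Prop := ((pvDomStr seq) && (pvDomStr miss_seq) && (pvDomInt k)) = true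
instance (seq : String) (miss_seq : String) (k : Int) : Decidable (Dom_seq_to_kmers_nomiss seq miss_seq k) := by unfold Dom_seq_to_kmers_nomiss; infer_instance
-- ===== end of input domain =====

-- B tests each miss_seq window in O(1) via one prefix-count pass instead of recounting every
-- k-wide slice; for k ≤ 0 B returns [] where A returns accidental slice fragments (D_ below).

-- ===== PORT A =====
-- while i+k <= len_sequence: kmers.append(sequence[i:i+k]); i += 1
def seqToKmersLoop (sequence : String) (k : Int) (i : Int) (kmers : List String) : List String :=
  if _h : i + k ≤ PySem.Str.len sequence then
    seqToKmersLoop sequence k (i + 1) (kmers ++ [PySem.Str.slice sequence (some i) (some (i + k))])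
  else kmers
termination_by (PySem.Str.len sequence + 1 - k - i).toNat
decreasing_by omega

def seq_to_kmers (sequence : String) (k : Int) : List String :=
  seqToKmersLoop sequence k 0 []

def seq_to_kmers_nomiss (seq : String) (miss_seq : String) (k : Int) : List String :=
  let seq_kmers := seq_to_kmers seq k
  let miss_kmers := seq_to_kmers miss_seq k
  (seq_kmers.zip miss_kmers).foldl
    (fun new_kmers p => if PySem.Str.count p.2 "X" = 0 then new_kmers ++ [p.1] else new_kmers) []

-- ===== PORT B =====
def seq_to_kmers_nomiss_alt (seq : String) (miss_seq : String) (k : Int) : List String :=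
  if k < 0 then []
  else
    let n : Int := min (PySem.Str.len seq) (PySem.Str.len miss_seq)
    let pref : List Int := (PySem.Str.slice miss_seq none (some n)).toList.foldl
      (fun pref ch => pref ++ [PySem.List.pyGetD pref (-1) 0 + (if ch == 'X' then 1 else 0)]) [0]
    ((PySem.List.pyRange 0 (n - k + 1) 1).filter
      (fun i => PySem.List.pyGetD pref (i + k) 0 == PySem.List.pyGetD pref i 0)).map
      (fun i => PySem.Str.slice seq (some i) (some (i + k)))

-- ===== PRECONDITION & SPEC =====
-- For k < 0 A returns a non-empty list of accidental slice fragments (empty strings and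
-- negative-stop slices of seq), an artefact of Python slice arithmetic; B returns [], the
-- intended value since no k-mer of negative length exists.
def D_seq_to_kmers_nomiss (seq : String) (miss_seq : String) (k : Int) : Prop := k < 0
instance (seq : String) (miss_seq : String) (k : Int) : Decidable (D_seq_to_kmers_nomiss seq miss_seq k) := by unfold D_seq_to_kmers_nomiss; infer_instance

def Spec_seq_to_kmers_nomiss (seq : String) (miss_seq : String) (k : Int) (out : List String) : Prop := ¬ D_seq_to_kmers_nomiss seq miss_seq k → out = seq_to_kmers_nomiss_alt seq miss_seq k
instance (seq : String) (miss_seq : String) (k : Int) (out : List String) : Decidable (Spec_seq_to_kmers_nomiss seq miss_seq k out) := by unfold Spec_seq_to_kmers_nomiss; infer_instance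

def pvDiffWitness_seq_to_kmers_nomiss : String × String × Int := ("AB", "AB", -1)
def pvDiffWitnessOut_seq_to_kmers_nomiss : (List String) × (List String) := (["A", "", "", ""], [])

-- ===== CLAIM (what is proved, stated in full; the proofs are below) =====
def Claim_unchanged_seq_to_kmers_nomiss : Prop := ∀ (seq : String) (miss_seq : String) (k : Int), Dom_seq_to_kmers_nomiss seq miss_seq k → Spec_seq_to_kmers_nomiss seq miss_seq k (seq_to_kmers_nomiss seq miss_seq k)
def Claim_changed_seq_to_kmers_nomiss : Prop := Dom_seq_to_kmers_nomiss (pvDiffWitness_seq_to_kmers_nomiss.1) (pvDiffWitness_seq_to_kmers_nomiss.2.1) (pvDiffWitness_seq_to_kmers_nomiss.2.2) ∧ D_seq_to_kmers_nomiss (pvDiffWitness_seq_to_kmers_nomiss.1) (pvDiffWitness_seq_to_kmers_nomiss.2.1) (pvDiffWitness_seq_to_kmers_nomiss.2.2) ∧ seq_to_kmers_nomiss (pvDiffWitness_seq_to_kmers_nomiss.1) (pvDiffWitness_seq_to_kmers_nomiss.2.1) (pvDiffWitness_seq_to_kmers_nomiss.2.2) = pvDiffWitnessOut_seq_to_kmers_nomiss.1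 ∧ seq_to_kmers_nomiss_alt (pvDiffWitness_seq_to_kmers_nomiss.1) (pvDiffWitness_seq_to_kmers_nomiss.2.1) (pvDiffWitness_seq_to_kmers_nomiss.2.2) = pvDiffWitnessOut_seq_to_kmers_nomiss.2 ∧ pvDiffWitnessOut_seq_to_kmers_nomiss.1 ≠ pvDiffWitnessOut_seq_to_kmers_nomiss.2
def Claim_exact_seq_to_kmers_nomiss : Prop := ∀ (seq : String) (miss_seq : String) (k : Int), Dom_seq_to_kmers_nomiss seq miss_seq k → D_seq_to_kmers_nomiss seq miss_seq k → seq_to_kmers_nomiss seq miss_seq k ≠ seq_to_kmers_nomiss_alt seq miss_seq k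

-- ===== LEMMAS AND PROOFS =====

-- A's while loop produces the slices at indices i, i+1, …, len-k.
theorem seqToKmersLoop_eq (s : String) (k i : Int) (acc : List String) :
    seqToKmersLoop s k i acc =
      acc ++ (PySem.List.pyRange i (PySem.Str.len s - k + 1) 1).map
        (fun j => PySem.Str.slice s (some j) (some (j + k))) := by
  fun_induction seqToKmersLoop s k i acc with
  | case1 i acc h ih =>
    have hab : i < PySem.Str.len s - k + 1 := by omega
    rw [ih, PySem.List.pyRange_one_cons hab]
    simp
  | case2 i acc h =>
    rw [PySem.List.pyRange_one_eq_nil (by omega)]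
    simp

theorem seq_to_kmers_eq (s : String) (k : Int) :
    seq_to_kmers s k = (List.range ((s.length : Int) - k + 1).toNat).map
      (fun t : ℕ => PySem.Str.slice s (some (t : Int)) (some ((t : Int) + k))) := by
  rw [seq_to_kmers, seqToKmersLoop_eq, PySem.List.pyRange_one]
  simp [PySem.Str.len_eq, List.map_map, Function.comp_def]

theorem zip_map_range {α β : Type} (f : ℕ → α) (g : ℕ → β) (a b : ℕ) :
    ((List.range a).map f).zip ((List.range b).map g) =
      (List.range (min a b)).map (fun i => (f i, g i)) := by
  apply List.ext_getElem
  · simp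
  · intro i h1 h2
    simp [List.getElem_zip]

theorem count_go_singleton (c : Char) (s : List Char) (fuel acc : ℕ) (h : s.length ≤ fuel) :
    PySem.Chars.count.go [c] fuel s acc = acc + s.count c := by
  induction s generalizing fuel acc with
  | nil => cases fuel <;> simp [PySem.Chars.count.go]
  | cons hd tl ih =>
    cases fuel with
    | zero => simp at h
    | succ f =>
      rw [PySem.Chars.count.go]
      by_cases hc : hd = c
      · subst hc
        simp [List.isPrefixOf, ih _ _ (by simpa using h)]
        omega
      · simp [List.isPrefixOf, hc, ih _ _ (by simpa using h), Ne.symm hc]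

-- single-character substring count is character count
theorem chars_count_singleton (c : Char) (s : List Char) :
    PySem.Chars.count s [c] = s.count c := by
  rw [PySem.Chars.count]
  simp [count_go_singleton c s s.length 0 le_rfl]

theorem pyGetD_append_neg_one (l : List Int) (x : Int) :
    PySem.List.pyGetD (l ++ [x]) (-1) 0 = x := by
  simp [PySem.List.pyGetD, PySem.List.pyIdx?, PySem.List.pyGet?]

-- the prefix list B builds holds the 'X'-counts of all prefixes
theorem pref_spec (cs : List Char) :
    cs.foldl (fun pref ch => pref ++ [PySem.List.pyGetD pref (-1) 0 + (if ch == 'X' then 1 else 0)]) [0]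
      = (List.range (cs.length + 1)).map (fun j => ((cs.take j).count 'X' : Int)) := by
  induction cs using List.reverseRecOn with
  | nil => simp
  | append_singleton ds d ih =>
    rw [List.foldl_append, ih]
    have hlast : PySem.List.pyGetD ((List.range (ds.length + 1)).map (fun j => ((ds.take j).count 'X' : Int))) (-1) 0
        = (ds.count 'X' : Int) := by
      rw [show (List.range (ds.length + 1)).map (fun j => ((ds.take j).count 'X' : Int))
            = (List.range ds.length).map (fun j => ((ds.take j).count 'X' : Int)) ++ [(ds.count 'X' : Int)] by
        rw [List.range_succ]; simp]
      exact pyGetD_append_neg_one _ _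
    simp only [List.foldl_cons, List.foldl_nil, hlast]
    symm
    rw [show (ds ++ [d]).length + 1 = (ds.length + 1) + 1 by simp, List.range_succ, List.map_append]
    congr 1
    · apply List.map_congr_left
      intro j hj
      simp at hj
      rw [List.take_append_of_le_length (by omega)]
    · simp only [List.map_cons, List.map_nil]
      rw [List.take_of_length_le (by simp)]
      simp [List.count_append]
      split_ifs <;> simp_all

-- A's zip-and-filter loop, characterised as a filtered index range (holds for every k)
set_option maxHeartbeats 2000000 in
theorem seq_to_kmers_nomiss_char (seq miss_seq : String) (k : Int) :
    seq_to_kmers_nomiss seq miss_seq k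
      = ((List.range (min ((seq.length : Int) - k + 1).toNat ((miss_seq.length : Int) - k + 1).toNat)).filter
          (fun t : ℕ => decide (PySem.Chars.count (PySem.List.slice miss_seq.toList (some (t : Int)) (some ((t : Int) + k))) ['X'] = 0))).map
          (fun t : ℕ => PySem.Str.slice seq (some (t : Int)) (some ((t : Int) + k))) := by
  show (((seq_to_kmers seq k).zip (seq_to_kmers miss_seq k)).foldl
      (fun new_kmers p => if PySem.Str.count p.2 "X" = 0 then new_kmers ++ [p.1] else new_kmers) [])
    = _
  rw [seq_to_kmers_eq, seq_to_kmers_eq, zip_map_range,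
      PySem.List.foldl_append_ite (p := fun pr : String × String => PySem.Str.count pr.2 "X" = 0)
        (f := Prod.fst),
      List.filter_map, List.map_map]
  simp [Function.comp_def]

set_option maxHeartbeats 2000000 in
theorem main_eq (seq miss_seq : String) (k : Int) (hk : ¬ k < 0) :
    seq_to_kmers_nomiss seq miss_seq k = seq_to_kmers_nomiss_alt seq miss_seq k := by
  have hk0 : 0 ≤ k := by omega
  rw [seq_to_kmers_nomiss_char]
  -- B side
  rw [seq_to_kmers_nomiss_alt, if_neg hk]
  have hn : min (PySem.Str.len seq) (PySem.Str.len miss_seq) = ((min seq.length miss_seq.length : ℕ) : Int) := by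
    simp [PySem.Str.len_eq]
  have hcs : (PySem.Str.slice miss_seq none (some ((min seq.length miss_seq.length : ℕ) : Int))).toList
      = miss_seq.toList.take (min seq.length miss_seq.length) := by
    rw [PySem.Str.toList_slice, PySem.Chars.slice_eq_listSlice, PySem.List.slice_to_natCast]
  have hlen : (miss_seq.toList.take (min seq.length miss_seq.length)).length = min seq.length miss_seq.length := by
    simp
  simp only [hn, hcs, pref_spec, hlen]
  have hN : (((min seq.length miss_seq.length : ℕ) : Int) - k + 1 - 0).toNat
      = min ((seq.length : Int) - k + 1).toNat ((miss_seq.length : Int) - k + 1).toNat := by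
    omega
  rw [PySem.List.pyRange_one, hN, List.filter_map, List.map_map]
  congr 1
  · funext x
    simp
  apply List.filter_congr
  intro t ht
  simp only [List.mem_range] at ht
  have htk : t + k.toNat ≤ min seq.length miss_seq.length := by omega
  have hfm : PySem.List.slice miss_seq.toList (some (t : Int)) (some ((t : Int) + k))
      = (miss_seq.toList.drop t).take k.toNat := by
    rw [PySem.List.slice_toNat miss_seq.toList (a := (t : Int)) (b := (t : Int) + k) (by omega) (by omega)]
    congr 1
    omega
  have hgetk : PySem.List.pyGetD ((List.range (min seq.length miss_seq.length + 1)).map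
        (fun j => (((miss_seq.toList.take (min seq.length miss_seq.length)).take j).count 'X' : Int)))
        ((0 : Int) + (t : Int) + k) 0
      = (((miss_seq.toList.take (min seq.length miss_seq.length)).take (t + k.toNat)).count 'X' : Int) := by
    have hc : ((0 : Int) + (t : Int) + k) = ((t + k.toNat : ℕ) : Int) := by omega
    rw [hc, PySem.List.pyGetD_natCast, PySem.List.getD_map_range _ _ _ _ (by omega)]
  have hgett : PySem.List.pyGetD ((List.range (min seq.length miss_seq.length + 1)).map
        (fun j => (((miss_seq.toList.take (min seq.length miss_seq.length)).take j).count 'X' : Int)))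
        ((0 : Int) + (t : Int)) 0
      = (((miss_seq.toList.take (min seq.length miss_seq.length)).take t).count 'X' : Int) := by
    have hc : ((0 : Int) + (t : Int)) = ((t : ℕ) : Int) := by omega
    rw [hc, PySem.List.pyGetD_natCast, PySem.List.getD_map_range _ _ _ _ (by omega)]
  simp only [Function.comp_def, hfm, chars_count_singleton, hgetk, hgett]
  have hwin : ((miss_seq.toList.take (min seq.length miss_seq.length)).take (t + k.toNat)).count 'X'
      = ((miss_seq.toList.take (min seq.length miss_seq.length)).take t).count 'X'
        + ((miss_seq.toList.drop t).take k.toNat).count 'X' := by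
    rw [List.take_add, List.count_append]
    congr 2
    rw [List.drop_take, List.take_take]
    congr 1
    omega
  rw [hwin]
  simp only [beq_eq_decide, decide_eq_decide]
  push_cast
  omega

-- ===== VERDICT (by name: the statement is the Claim_ definition above) =====
theorem seq_to_kmers_nomiss_spec : Claim_unchanged_seq_to_kmers_nomiss := by
  intro seq miss_seq k _ hD
  exact main_eq seq miss_seq k hD

theorem seq_to_kmers_nomiss_changed : Claim_changed_seq_to_kmers_nomiss := by
  unfold Claim_changed_seq_to_kmers_nomiss
  refine ⟨by decide, by decide, ?_, by decide, by decide⟩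
  show seq_to_kmers_nomiss "AB" "AB" (-1) = ["A", "", "", ""]
  rw [seq_to_kmers_nomiss_char]
  decide

theorem seq_to_kmers_nomiss_tight : Claim_exact_seq_to_kmers_nomiss := by
  intro seq miss_seq k _ hk
  have hk' : k < 0 := hk
  rw [seq_to_kmers_nomiss_char, seq_to_kmers_nomiss_alt, if_pos hk']
  set t : ℕ := min seq.length miss_seq.length + (-k).toNat with ht
  have hp : PySem.List.slice miss_seq.toList (some (t : Int)) (some ((t : Int) + k)) = [] := by
    rw [PySem.List.slice_toNat miss_seq.toList (a := (t : Int)) (b := (t : Int) + k) (by omega) (by omega)]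
    have hz : ((t : Int) + k).toNat - ((t : Int)).toNat = 0 := by omega
    rw [hz]
    simp
  apply List.ne_nil_of_mem (a := PySem.Str.slice seq (some (t : Int)) (some ((t : Int) + k)))
  apply List.mem_map_of_mem
  refine List.mem_filter.mpr ⟨List.mem_range.mpr (by omega), ?_⟩
  rw [hp]
  decide
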